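-- pv_equiv track=rewrite | github.com/robekenn/Sign-up-Sign-in-Microservice | sign_up.py | _generate_userid
-- ===== SOURCE A (Python) =====
-- def _generate_userid(users):
--     # No users, return user_001
--     if not users:
--         return "user_001"
--
--     used_numbers = set()
--
--     # Generate the smallest unused user_xxx based on the existing list of user IDs.
--     for user in users:
--         user_id = user.get("id", "")
--         parts = user_id.split("_")
--         if len(parts) == 2 and parts[1].isdigit():
--             num = int(parts[1])
--             used_numbers.add(num)
--
--     new_num = 1
--     while new_num in used_numbers:
--         new_num += 1
--
--     return f"user_{new_num:03d}"
-- ===== SOURCE B (Python) =====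
-- def _generate_userid(users):
--     # No users, return user_001
--     if not users:
--         return "user_001"
--
--     nums = []
--     for user in users:
--         parts = user.get("id", "").split("_")
--         if len(parts) == 2 and parts[1].isdigit():
--             nums.append(int(parts[1]))
--
--     nums.sort()
--     cand = 1
--     for v in nums:
--         if v < cand:
--             continue          # non-positive suffixes and duplicates
--         if v == cand:
--             cand += 1
--         else:
--             break             # first gap found
--     return f"user_{cand:03d}"
-- ===== Notes on version B (the rewrite author's own statement) =====
-- stated objective: alternative
-- what changed: Replaces A's set-build plus while-loop membership probing with collecting the parsed suffixes into a list, sorting it, and one walk of the sorted list that skips values below the candidate and stops at the first gap.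
import Mathlib
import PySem

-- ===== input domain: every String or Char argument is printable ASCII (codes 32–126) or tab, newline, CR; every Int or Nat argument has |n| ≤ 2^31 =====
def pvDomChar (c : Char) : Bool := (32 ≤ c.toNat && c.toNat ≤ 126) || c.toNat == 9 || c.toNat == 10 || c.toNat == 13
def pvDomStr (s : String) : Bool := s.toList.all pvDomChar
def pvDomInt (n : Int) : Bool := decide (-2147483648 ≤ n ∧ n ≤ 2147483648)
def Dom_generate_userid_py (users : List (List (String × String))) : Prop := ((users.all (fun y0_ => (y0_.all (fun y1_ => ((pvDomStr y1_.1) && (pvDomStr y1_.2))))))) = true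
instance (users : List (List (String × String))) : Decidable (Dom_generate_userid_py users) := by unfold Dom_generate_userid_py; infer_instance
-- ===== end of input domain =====

-- B replaces A's set + while-loop probing by sort-then-walk over the parsed suffixes (alternative decomposition, similar cost).

-- ===== PORT A =====
theorem pvFilterLen_mono {A : Type} (p q : A → Bool) (himp : ∀ x, p x = true → q x = true)
    (t : List A) : (t.filter p).length ≤ (t.filter q).length := by
  induction t with
  | nil => simp
  | cons a t ih =>
    simp only [List.filter_cons]
    by_cases h : p a = true
    · rw [if_pos h, if_pos (himp a h)]
      simp only [List.length_cons]
      omega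
    · rw [if_neg h]
      by_cases h2 : q a = true
      · rw [if_pos h2]
        simp only [List.length_cons]
        omega
      · rw [if_neg h2]
        exact ih

-- termination of the while-loop: the count of set elements ≥ new_num strictly drops
theorem pvWhileA_decreases (used : List Int) (n : Int) (h : n ∈ used) :
    (used.filter (fun x => decide (n + 1 ≤ x))).length < (used.filter (fun x => decide (n ≤ x))).length := by
  have hmono := pvFilterLen_mono (fun x => decide (n + 1 ≤ x)) (fun x => decide (n ≤ x))
    (fun x hx => by simp only [decide_eq_true_eq] at hx ⊢; omega)
  induction used with
  | nil => simp at h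
  | cons a t ih =>
    simp only [List.filter_cons]
    rcases List.mem_cons.1 h with rfl | ha
    · rw [if_neg (by simp only [decide_eq_true_eq]; omega), if_pos (by simp only [decide_eq_true_eq]; omega)]
      have := hmono t
      simp only [List.length_cons]
      omega
    · have h3 := ih ha
      by_cases h1 : decide (n + 1 ≤ a) = true <;> by_cases h2 : decide (n ≤ a) = true
      · rw [if_pos h1, if_pos h2]
        simp only [List.length_cons]
        omega
      · exfalso
        simp only [decide_eq_true_eq] at h1 h2
        omega
      · rw [if_neg h1, if_pos h2]
        have := hmono t
        simp only [List.length_cons]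
        omega
      · rw [if_neg h1, if_neg h2]
        exact h3

-- the while-loop 'while new_num in used_numbers: new_num += 1'
def pvWhileA (used : PySem.Set Int) (n : Int) : Int :=
  if h : n ∈ used then pvWhileA used (n + 1) else n
termination_by (used.filter (fun x => decide (n ≤ x))).length
decreasing_by exact pvWhileA_decreases used n h

def generate_userid_py (users : List (List (String × String))) : String :=
  if users = [] then "user_001"
  else
    let used_numbers : PySem.Set Int := users.foldl (fun used_numbers user =>
      let user_id := (PySem.Dict.mk user).getD "id" ""
      let parts := (PySem.Str.split? user_id "_").getD []
      if parts.length = 2 ∧ PySem.Str.strIsdigit (PySem.List.pyGetD parts 1 "") = true then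
        PySem.Set.add used_numbers ((PySem.Int.ofStr? (PySem.List.pyGetD parts 1 "")).getD 0)
      else used_numbers) PySem.Set.empty
    let new_num := pvWhileA used_numbers 1
    "user_" ++ PySem.Str.zfill (PySem.Int.toStr new_num) 3

-- ===== PORT B =====
-- the for-loop over the sorted list with 'continue'/'break'
def pvWalkB (cand : Int) (vs : List Int) : Int :=
  match vs with
  | [] => cand
  | v :: rest =>
    if v < cand then pvWalkB cand rest
    else if v = cand then pvWalkB (cand + 1) rest
    else cand

def generate_userid_py_alt (users : List (List (String × String))) : String :=
  if users = [] then "user_001"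
  else
    let nums : List Int := users.foldl (fun nums user =>
      let parts := (PySem.Str.split? ((PySem.Dict.mk user).getD "id" "") "_").getD []
      if parts.length = 2 ∧ PySem.Str.strIsdigit (PySem.List.pyGetD parts 1 "") = true then
        nums ++ [(PySem.Int.ofStr? (PySem.List.pyGetD parts 1 "")).getD 0]
      else nums) []
    let sortedNums := PySem.List.sorted nums (fun x => x) false
    "user_" ++ PySem.Str.zfill (PySem.Int.toStr (pvWalkB 1 sortedNums)) 3

-- ===== PRECONDITION & SPEC =====
def Spec_generate_userid_py (users : List (List (String × String))) (out : String) : Prop := out = generate_userid_py_alt users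
instance (users : List (List (String × String))) (out : String) : Decidable (Spec_generate_userid_py users out) := by unfold Spec_generate_userid_py; infer_instance

-- ===== CLAIM (what is proved, stated in full; the proofs are below) =====
def Claim_equal_generate_userid_py : Prop := ∀ (users : List (List (String × String))), Dom_generate_userid_py users → Spec_generate_userid_py users (generate_userid_py users)

-- ===== LEMMAS AND PROOFS =====

-- the common per-user parse (proofs only; the ports inline it)
def pvParse? (user : List (String × String)) : Option Int :=
  if ((PySem.Str.split? ((PySem.Dict.mk user).getD "id" "") "_").getD []).length = 2 ∧
      PySem.Str.strIsdigit (PySem.List.pyGetD ((PySem.Str.split? ((PySem.Dict.mk user).getD "id" "") "_").getD []) 1 "") = true then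
    some ((PySem.Int.ofStr? (PySem.List.pyGetD ((PySem.Str.split? ((PySem.Dict.mk user).getD "id" "") "_").getD []) 1 "")).getD 0)
  else none

def pvStepA (used : PySem.Set Int) (user : List (String × String)) : PySem.Set Int :=
  match pvParse? user with
  | some v => PySem.Set.add used v
  | none => used

def pvStepB (nums : List Int) (user : List (String × String)) : List Int :=
  match pvParse? user with
  | some v => nums ++ [v]
  | none => nums

theorem pvStepA_eq :
    (fun (used_numbers : PySem.Set Int) (user : List (String × String)) =>
      let user_id := (PySem.Dict.mk user).getD "id" ""
      let parts := (PySem.Str.split? user_id "_").getD []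
      if parts.length = 2 ∧ PySem.Str.strIsdigit (PySem.List.pyGetD parts 1 "") = true then
        PySem.Set.add used_numbers ((PySem.Int.ofStr? (PySem.List.pyGetD parts 1 "")).getD 0)
      else used_numbers) = pvStepA := by
  funext S u
  show _ = pvStepA S u
  unfold pvStepA pvParse?
  by_cases h : ((PySem.Str.split? ((PySem.Dict.mk u).getD "id" "") "_").getD []).length = 2 ∧
      PySem.Str.strIsdigit (PySem.List.pyGetD ((PySem.Str.split? ((PySem.Dict.mk u).getD "id" "") "_").getD []) 1 "") = true
  · rw [if_pos h, if_pos h]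
  · rw [if_neg h, if_neg h]

theorem pvStepB_eq :
    (fun (nums : List Int) (user : List (String × String)) =>
      let parts := (PySem.Str.split? ((PySem.Dict.mk user).getD "id" "") "_").getD []
      if parts.length = 2 ∧ PySem.Str.strIsdigit (PySem.List.pyGetD parts 1 "") = true then
        nums ++ [(PySem.Int.ofStr? (PySem.List.pyGetD parts 1 "")).getD 0]
      else nums) = pvStepB := by
  funext acc u
  show _ = pvStepB acc u
  unfold pvStepB pvParse?
  by_cases h : ((PySem.Str.split? ((PySem.Dict.mk u).getD "id" "") "_").getD []).length = 2 ∧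
      PySem.Str.strIsdigit (PySem.List.pyGetD ((PySem.Str.split? ((PySem.Dict.mk u).getD "id" "") "_").getD []) 1 "") = true
  · rw [if_pos h, if_pos h]
  · rw [if_neg h, if_neg h]

theorem pvMemA (users : List (List (String × String))) (S : PySem.Set Int) (x : Int) :
    x ∈ users.foldl pvStepA S ↔ x ∈ S ∨ x ∈ users.filterMap pvParse? := by
  induction users generalizing S with
  | nil => simp
  | cons u t ih =>
    simp only [List.foldl_cons, List.filterMap_cons]
    rcases hu : pvParse? u with _ | v
    · rw [pvStepA, hu, ih]
    · rw [pvStepA, hu, ih]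
      simp only [PySem.Set.mem_add, List.mem_cons]
      tauto

theorem pvListB (users : List (List (String × String))) (acc : List Int) :
    users.foldl pvStepB acc = acc ++ users.filterMap pvParse? := by
  induction users generalizing acc with
  | nil => simp
  | cons u t ih =>
    simp only [List.foldl_cons, List.filterMap_cons]
    rcases hu : pvParse? u with _ | v
    · rw [pvStepB, hu, ih]
    · rw [pvStepB, hu, ih]
      simp

-- characterisation of A's while-loop
theorem pvWhileA_spec (used : PySem.Set Int) (n : Int) :
    pvWhileA used n ∉ used ∧ n ≤ pvWhileA used n ∧
      ∀ k, n ≤ k → k < pvWhileA used n → k ∈ used := by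
  induction n using pvWhileA.induct used with
  | case1 n h ih =>
    rw [pvWhileA, dif_pos h]
    refine ⟨ih.1, by omega, fun k hk1 hk2 => ?_⟩
    by_cases hkn : k = n
    · exact hkn ▸ h
    · exact ih.2.2 k (by omega) hk2
  | case2 n h =>
    rw [pvWhileA, dif_neg h]
    exact ⟨h, le_refl n, fun k h1 h2 => absurd h1 (by omega)⟩

-- characterisation of B's walk over a sorted list
theorem pvWalkB_spec (vs : List Int) (c : Int) (hs : vs.Pairwise (· ≤ ·)) :
    pvWalkB c vs ∉ vs ∧ c ≤ pvWalkB c vs ∧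
      ∀ k, c ≤ k → k < pvWalkB c vs → k ∈ vs := by
  induction vs generalizing c with
  | nil => exact ⟨by simp [pvWalkB], le_refl c, fun k h1 h2 => absurd h1 (by simp [pvWalkB] at h2; omega)⟩
  | cons v rest ih =>
    have hrest : rest.Pairwise (· ≤ ·) := (List.pairwise_cons.1 hs).2
    rw [pvWalkB]
    by_cases h1 : v < c
    · rw [if_pos h1]
      have this1 := ih c hrest
      refine ⟨?_, this1.2.1, fun k hk1 hk2 => List.mem_cons_of_mem _ (this1.2.2 k hk1 hk2)⟩
      simp only [List.mem_cons, not_or]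
      exact ⟨by omega, this1.1⟩
    · rw [if_neg h1]
      by_cases h2 : v = c
      · rw [if_pos h2]
        have this1 := ih (c + 1) hrest
        refine ⟨?_, by omega, fun k hk1 hk2 => ?_⟩
        · simp only [List.mem_cons, not_or]
          exact ⟨by omega, this1.1⟩
        · by_cases hkc : k = c
          · exact hkc ▸ h2 ▸ List.mem_cons_self
          · exact List.mem_cons_of_mem _ (this1.2.2 k (by omega) hk2)
      · rw [if_neg h2]
        refine ⟨?_, le_refl c, fun k hh1 hh2 => absurd hh1 (by omega)⟩
        simp only [List.mem_cons, not_or]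
        refine ⟨by omega, fun hc => ?_⟩
        have := (List.pairwise_cons.1 hs).1 c hc
        omega

-- the two characterised values agree when the membership predicates agree
theorem pvFirstFree_unique (r1 r2 : Int) (P : Int → Prop)
    (h1 : ¬ P r1 ∧ 1 ≤ r1 ∧ ∀ k, 1 ≤ k → k < r1 → P k)
    (h2 : ¬ P r2 ∧ 1 ≤ r2 ∧ ∀ k, 1 ≤ k → k < r2 → P k) : r1 = r2 := by
  by_contra hne
  rcases lt_or_gt_of_ne hne with hlt | hgt
  · exact h1.1 (h2.2.2 r1 h1.2.1 hlt)
  · exact h2.1 (h1.2.2 r2 h2.2.1 hgt)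

-- ===== VERDICT (by name: the statement is the Claim_ definition above) =====
theorem generate_userid_py_spec : Claim_equal_generate_userid_py := by
  intro users _
  unfold Spec_generate_userid_py generate_userid_py generate_userid_py_alt
  by_cases hnil : users = []
  · rw [if_pos hnil, if_pos hnil]
  · rw [if_neg hnil, if_neg hnil]
    simp only [pvStepA_eq, pvStepB_eq]
    have hmA : ∀ x : Int, x ∈ users.foldl pvStepA PySem.Set.empty ↔ x ∈ users.filterMap pvParse? := by
      intro x
      rw [pvMemA]
      simp [PySem.Set.empty]
    have hmB : ∀ x : Int,
        x ∈ PySem.List.sorted (users.foldl pvStepB []) (fun x => x) false ↔ x ∈ users.filterMap pvParse? := by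
      intro x
      rw [PySem.List.mem_sorted, pvListB]
      simp
    have hA := pvWhileA_spec (users.foldl pvStepA PySem.Set.empty) 1
    have hB := pvWalkB_spec (PySem.List.sorted (users.foldl pvStepB []) (fun x => x) false) 1
      (by simpa using PySem.List.sorted_pairwise (users.foldl pvStepB []) (fun x => x))
    have key : pvWhileA (users.foldl pvStepA PySem.Set.empty) 1
        = pvWalkB 1 (PySem.List.sorted (users.foldl pvStepB []) (fun x => x) false) :=
      pvFirstFree_unique _ _ (fun k => k ∈ users.filterMap pvParse?)
        ⟨fun h => hA.1 ((hmA _).2 h), hA.2.1, fun k h1 h2 => (hmA _).1 (hA.2.2 k h1 h2)⟩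
        ⟨fun h => hB.1 ((hmB _).2 h), hB.2.1, fun k h1 h2 => (hmB _).1 (hB.2.2 k h1 h2)⟩
    rw [key]
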